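-- pv_equiv track=rewrite | github.com/hubjh/release-note | default/release-note/app/release_note/resources/python_release.py | _parse_month
-- ===== SOURCE A (Python) =====
-- def _parse_month(text):
--     months = {
--         "Jan.": "January",
--         "Feb.": "February",
--         "March": "March",
--         "April": "April",
--         "May": "May",
--         "June": "June",
--         "July": "July",
--         "Aug.": "August",
--         "Sept.": "September",
--         "Oct.": "October",
--         "Nov.": "November",
--         "Dec.": "December"
--     }
--
--     for python_month, month in months.items():
--         text = text.replace(python_month, month)
--     return text
-- ===== SOURCE B (Python) =====
-- _MONTHS = [
--     ("Jan.", "January"),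
--     ("Feb.", "February"),
--     ("March", "March"),
--     ("April", "April"),
--     ("May", "May"),
--     ("June", "June"),
--     ("July", "July"),
--     ("Aug.", "August"),
--     ("Sept.", "September"),
--     ("Oct.", "October"),
--     ("Nov.", "November"),
--     ("Dec.", "December"),
-- ]
--
--
-- def _parse_month(text):
--     # Single left-to-right pass: at each position emit either the full month
--     # name (skipping the abbreviation) or the character itself.
--     out = []
--     i = 0
--     n = len(text)
--     while i < n:
--         for key, val in _MONTHS:
--             if text.startswith(key, i):
--                 out.append(val)
--                 i += len(key)
--                 break
--         else:
--             out.append(text[i])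
--             i += 1
--     return "".join(out)
-- ===== Notes on version B (the rewrite author's own statement) =====
-- stated objective: alternative
-- what changed: Replaces twelve sequential full-text str.replace passes by one single left-to-right scan that at each position tries the twelve abbreviations and emits either the full month name or the character (valid because keys are pairwise prefix-free and values never recreate or overlap a key).
import Mathlib
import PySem

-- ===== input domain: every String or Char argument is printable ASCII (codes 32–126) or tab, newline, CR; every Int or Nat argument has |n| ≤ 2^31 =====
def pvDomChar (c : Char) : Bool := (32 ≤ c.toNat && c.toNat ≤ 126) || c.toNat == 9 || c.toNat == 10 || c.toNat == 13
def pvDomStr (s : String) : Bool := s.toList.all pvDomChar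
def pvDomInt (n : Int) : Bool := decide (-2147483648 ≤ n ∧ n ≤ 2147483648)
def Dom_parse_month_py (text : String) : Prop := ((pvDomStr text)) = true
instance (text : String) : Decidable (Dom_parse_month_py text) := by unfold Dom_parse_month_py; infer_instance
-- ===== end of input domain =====

-- B replaces twelve sequential str.replace passes by one left-to-right scan that at each
-- position tries the twelve abbreviations and emits the full name or the character
-- (objective: alternative single-pass formulation; same return value, no side effects).

-- ===== PORT A =====
def parse_month_py (text : String) : String :=
  let months : PySem.Dict String String := PySem.Dict.ofList
    [("Jan.", "January"), ("Feb.", "February"), ("March", "March"), ("April", "April"),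
     ("May", "May"), ("June", "June"), ("July", "July"), ("Aug.", "August"),
     ("Sept.", "September"), ("Oct.", "October"), ("Nov.", "November"), ("Dec.", "December")]
  months.items.foldl (fun t p => PySem.Str.replace t p.1 p.2) text

-- ===== PORT B =====
-- Source B's module-level _MONTHS table, at the character level
def pvPairsC : List (List Char × List Char) := [
   (['J', 'a', 'n', '.'], ['J', 'a', 'n', 'u', 'a', 'r', 'y']),
   (['F', 'e', 'b', '.'], ['F', 'e', 'b', 'r', 'u', 'a', 'r', 'y']),
   (['M', 'a', 'r', 'c', 'h'], ['M', 'a', 'r', 'c', 'h']),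
   (['A', 'p', 'r', 'i', 'l'], ['A', 'p', 'r', 'i', 'l']),
   (['M', 'a', 'y'], ['M', 'a', 'y']),
   (['J', 'u', 'n', 'e'], ['J', 'u', 'n', 'e']),
   (['J', 'u', 'l', 'y'], ['J', 'u', 'l', 'y']),
   (['A', 'u', 'g', '.'], ['A', 'u', 'g', 'u', 's', 't']),
   (['S', 'e', 'p', 't', '.'], ['S', 'e', 'p', 't', 'e', 'm', 'b', 'e', 'r']),
   (['O', 'c', 't', '.'], ['O', 'c', 't', 'o', 'b', 'e', 'r']),
   (['N', 'o', 'v', '.'], ['N', 'o', 'v', 'e', 'm', 'b', 'e', 'r']),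
   (['D', 'e', 'c', '.'], ['D', 'e', 'c', 'e', 'm', 'b', 'e', 'r'])]

-- the inner `for key, val in _MONTHS: if text.startswith(key, i): … break / else: …`
def pvFindK (l : List Char) : Option (List Char × List Char) :=
  pvPairsC.find? (fun p => p.1.isPrefixOf l)

theorem pvPairsC_key_pos : ∀ p ∈ pvPairsC, 0 < p.1.length := by decide

-- the outer `while i < n` loop of Source B, one pass over the characters
def pvScanC : List Char → List Char
  | [] => []
  | c :: t =>
    match h : pvFindK (c :: t) with
    | some p => p.2 ++ pvScanC (List.drop p.1.length (c :: t))
    | none => c :: pvScanC t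
termination_by l => l.length
decreasing_by
  · have hp := List.mem_of_find?_eq_some h
    have := pvPairsC_key_pos p hp
    simp [List.length_drop]; omega
  · simp

def parse_month_py_alt (text : String) : String := String.ofList (pvScanC text.toList)

-- ===== PRECONDITION & SPEC =====
def Spec_parse_month_py (text : String) (out : String) : Prop := out = parse_month_py_alt text
instance (text : String) (out : String) : Decidable (Spec_parse_month_py text out) := by unfold Spec_parse_month_py; infer_instance

-- ===== CLAIM (what is proved, stated in full; the proofs are below) =====
def Claim_equal_parse_month_py : Prop := ∀ (text : String), Dom_parse_month_py text → Spec_parse_month_py text (parse_month_py text)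

-- ===== LEMMAS AND PROOFS =====

theorem pvIsPrefixOf_false {α : Type} [BEq α] [LawfulBEq α] {l₁ l₂ : List α} :
    l₁.isPrefixOf l₂ = false ↔ ¬ l₁ <+: l₂ := by
  rw [← List.isPrefixOf_iff_prefix, Bool.eq_false_iff, ne_eq]

-- A simple structural model of CPython str.replace (for a nonempty pattern)
def pvRepl (k v : List Char) : List Char → List Char
  | [] => []
  | c :: t =>
    if k.isPrefixOf (c :: t) then v ++ pvRepl k v (t.drop (k.length - 1))
    else c :: pvRepl k v t
termination_by l => l.length
decreasing_by
  · simp [List.length_drop]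
  · simp

theorem pvRepl_go (k v : List Char) (hk : k ≠ []) :
    ∀ fuel l acc, l.length ≤ fuel →
      PySem.Chars.replace.go k v fuel l acc = acc.reverse ++ pvRepl k v l := by
  intro fuel
  induction fuel with
  | zero =>
    intro l acc hl
    have : l = [] := List.eq_nil_of_length_eq_zero (Nat.le_zero.mp hl)
    subst this
    rw [PySem.Chars.replace.go.eq_def]
    simp [pvRepl]
  | succ n ih =>
    intro l acc hl
    match l with
    | [] =>
      rw [PySem.Chars.replace.go.eq_def]
      simp [pvRepl]
    | c :: t =>
      rw [PySem.Chars.replace.go.eq_def]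
      by_cases hpre : k.isPrefixOf (c :: t)
      · simp only [hpre, if_true]
        have hklen : 1 ≤ k.length := by
          cases k with | nil => exact absurd rfl hk | cons a b => simp
        have hdl : (List.drop k.length (c :: t)).length ≤ n := by
          rw [List.length_drop]
          simp only [List.length_cons] at hl ⊢
          omega
        rw [ih _ _ hdl]
        have hdrop : List.drop k.length (c :: t) = t.drop (k.length - 1) := by
          cases k with
          | nil => exact absurd rfl hk
          | cons a b => simp
        rw [hdrop]
        simp [pvRepl, hpre]
      · simp only [hpre]
        have : t.length ≤ n := by simp only [List.length_cons] at hl; omega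
        rw [ih _ _ this]
        simp [pvRepl, hpre]

theorem pvRepl_eq_replace (k v l : List Char) (hk : k ≠ []) :
    PySem.Chars.replace l k v = pvRepl k v l := by
  unfold PySem.Chars.replace
  have : k.isEmpty = false := by cases k with | nil => exact absurd rfl hk | cons a b => rfl
  simp only [this, Bool.false_eq_true, if_false]
  simpa using pvRepl_go k v hk l.length l [] (le_refl _)

-- the chain of replaces, at the character level
def pvChain (P : List (List Char × List Char)) (l : List Char) : List Char :=
  P.foldl (fun s p => pvRepl p.1 p.2 s) l

theorem pvChain_toList (L : List (String × String)) (hL : ∀ p ∈ L, p.1 ≠ "") :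
    ∀ t : String, (L.foldl (fun t p => PySem.Str.replace t p.1 p.2) t).toList =
      pvChain (L.map (fun p => (p.1.toList, p.2.toList))) t.toList := by
  induction L with
  | nil => intro t; simp [pvChain]
  | cons p L ih =>
    intro t
    have hne : p.1.toList ≠ [] := by
      intro h
      exact hL p (by simp) (by
        have := congrArg String.ofList h
        simpa using this)
    simp only [List.foldl_cons, List.map_cons]
    rw [ih (fun q hq => hL q (by simp [hq]))]
    simp only [pvChain, List.foldl_cons]
    congr 1
    rw [← pvRepl_eq_replace _ _ _ hne]
    simp [PySem.Str.replace]

-- "k can never match starting strictly inside or at w, whatever follows w"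
def pvComp (k w : List Char) : Bool :=
  w.tails.all (fun s => s.isEmpty || (!s.isPrefixOf k && !k.isPrefixOf s))

theorem pvComp_tail (k : List Char) (a : Char) (w : List Char)
    (h : pvComp k (a :: w) = true) : pvComp k w = true := by
  simp only [pvComp, List.tails_cons, List.all_cons, Bool.and_eq_true] at h
  exact h.2

theorem pvComp_self (k w : List Char) (hw : w ≠ []) (h : pvComp k w = true) :
    ¬ w <+: k ∧ ¬ k <+: w := by
  simp only [pvComp, List.all_eq_true] at h
  have hmem : w ∈ w.tails := by
    cases w with
    | nil => exact absurd rfl hw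
    | cons a t => simp
  have := h w hmem
  cases w with
  | nil => exact absurd rfl hw
  | cons a t =>
    simp only [List.isEmpty_cons, Bool.false_or, Bool.and_eq_true, Bool.not_eq_true',
      pvIsPrefixOf_false] at this
    exact this

theorem pvRepl_block (k v w : List Char) (h : pvComp k w = true) :
    ∀ x, pvRepl k v (w ++ x) = w ++ pvRepl k v x := by
  induction w with
  | nil => intro x; simp
  | cons a w ih =>
    intro x
    have hself := pvComp_self k (a :: w) (by simp) h
    have hnp : k.isPrefixOf (a :: w ++ x) = false := by
      rw [pvIsPrefixOf_false]
      intro hp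
      by_cases hlen : k.length ≤ (a :: w).length
      · have : k <+: (a :: w) := List.prefix_of_prefix_length_le hp (List.prefix_append _ _) hlen
        exact hself.2 this
      · have : (a :: w) <+: k :=
          List.prefix_of_prefix_length_le (List.prefix_append _ _) hp (by omega)
        exact hself.1 this
    show pvRepl k v (a :: (w ++ x)) = a :: w ++ pvRepl k v x
    rw [pvRepl]
    simp only [List.cons_append] at hnp
    rw [hnp]
    simp only [Bool.false_eq_true, if_false]
    rw [ih (pvComp_tail k a w h) x]
    simp

theorem pvRepl_head (k v x : List Char) (hk : k ≠ []) :
    pvRepl k v (k ++ x) = v ++ pvRepl k v x := by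
  match k with
  | [] => exact absurd rfl hk
  | c :: k' =>
    show pvRepl (c :: k') v (c :: (k' ++ x)) = _
    rw [pvRepl]
    have hpre : (c :: k').isPrefixOf (c :: (k' ++ x)) = true := by
      rw [List.isPrefixOf_iff_prefix]
      exact ⟨x, by simp⟩
    rw [hpre]
    simp [List.drop_left']

theorem pvRepl_not_prefix (k : List Char) (vh : Char) (vt : List Char) :
    ∀ (l p : List Char), p ≠ [] → vh ∉ p → ¬ p <+: l → ¬ p <+: pvRepl k (vh :: vt) l := by
  intro l
  induction l with
  | nil =>
    intro p hp _ _
    simp only [pvRepl]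
    intro hpre
    exact hp (List.prefix_nil.mp hpre)
  | cons c t ih =>
    intro p hp hvh hnl
    rw [pvRepl]
    by_cases hpre : k.isPrefixOf (c :: t)
    · simp only [hpre, if_true]
      intro hcontra
      match p, hcontra with
      | [], _ => exact hp rfl
      | p0 :: p', hc =>
        have : p0 = vh := by
          have := List.cons_prefix_cons.mp hc
          exact this.1
        exact hvh (this ▸ List.mem_cons_self)
    · simp only [hpre, Bool.false_eq_true, if_false]
      intro hcontra
      match p, hcontra with
      | [], _ => exact hp rfl
      | p0 :: p', hc =>
        have h0 : p0 = c ∧ p' <+: pvRepl k (vh :: vt) t := List.cons_prefix_cons.mp hc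
        cases hq : p' with
        | nil =>
          subst hq
          exact hnl (by simp [h0.1])
        | cons q0 q' =>
          subst hq
          have hnp' : ¬ (q0 :: q') <+: t := by
            intro hx
            exact hnl (List.cons_prefix_cons.mpr ⟨h0.1, hx⟩)
          exact ih (q0 :: q') (by simp) (fun hm => hvh (List.mem_cons_of_mem _ hm)) hnp' h0.2

theorem pvChain_nil (P : List (List Char × List Char)) : pvChain P [] = [] := by
  induction P with
  | nil => rfl
  | cons p P ih => simpa [pvChain, pvRepl] using ih

theorem pvChain_block (Q : List (List Char × List Char)) (w : List Char)
    (h : ∀ q ∈ Q, pvComp q.1 w = true) :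
    ∀ x, pvChain Q (w ++ x) = w ++ pvChain Q x := by
  induction Q with
  | nil => intro x; simp [pvChain]
  | cons q Q ih =>
    intro x
    simp only [pvChain, List.foldl_cons]
    rw [pvRepl_block q.1 q.2 w (h q (by simp)) x]
    exact ih (fun r hr => h r (by simp [hr])) (pvRepl q.1 q.2 x)

theorem pvChain_some (P1 P2 : List (List Char × List Char)) (k v s : List Char)
    (hk : k ≠ [])
    (h1 : ∀ q ∈ P1, pvComp q.1 k = true) (h2 : ∀ q ∈ P2, pvComp q.1 v = true) :
    pvChain (P1 ++ (k, v) :: P2) (k ++ s) = v ++ pvChain (P1 ++ (k, v) :: P2) s := by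
  simp only [pvChain, List.foldl_append, List.foldl_cons]
  rw [show (P1.foldl (fun s p => pvRepl p.1 p.2 s) (k ++ s)) = pvChain P1 (k ++ s) from rfl,
      pvChain_block P1 k h1 s]
  show P2.foldl _ (pvRepl k v (k ++ pvChain P1 s)) = _
  rw [pvRepl_head k v _ hk]
  rw [show ∀ y, P2.foldl (fun s p => pvRepl p.1 p.2 s) y = pvChain P2 y from fun _ => rfl]
  rw [pvChain_block P2 v h2]
  rfl

theorem pvChain_none (P : List (List Char × List Char)) (c : Char)
    (hpv : ∀ p ∈ P, p.2 ≠ [])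
    (hh : ∀ p ∈ P, ∀ q ∈ P, ∀ a ∈ q.1.drop 1, p.2.head? ≠ some a) :
    ∀ t, (∀ p ∈ P, ¬ p.1 <+: (c :: t)) → pvChain P (c :: t) = c :: pvChain P t := by
  induction P with
  | nil => intro t _; rfl
  | cons p P ih =>
    intro t hl
    simp only [pvChain, List.foldl_cons]
    have hstep : pvRepl p.1 p.2 (c :: t) = c :: pvRepl p.1 p.2 t := by
      rw [pvRepl]
      have : p.1.isPrefixOf (c :: t) = false := by
        rw [pvIsPrefixOf_false]
        exact hl p (by simp)
      rw [this]
      simp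
    rw [hstep]
    obtain ⟨vh, vt, hv⟩ : ∃ vh vt, p.2 = vh :: vt := by
      cases hpv2 : p.2 with
      | nil => exact absurd hpv2 (hpv p (by simp))
      | cons a b => exact ⟨a, b, rfl⟩
    have hl' : ∀ q ∈ P, ¬ q.1 <+: (c :: pvRepl p.1 p.2 t) := by
      intro q hq hcontra
      match hq1 : q.1, hcontra with
      | [], _ => exact hl q (by simp [hq]) (by simp [hq1])
      | q0 :: q', hc =>
        have h0 := List.cons_prefix_cons.mp hc
        have hq0 : q0 = c := h0.1
        cases hqq : q' with
        | nil =>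
          exact hl q (by simp [hq]) (by simp [hq1, hq0, hqq, List.cons_prefix_cons])
        | cons r0 r' =>
          have hnq' : ¬ (r0 :: r') <+: t := by
            intro hx
            exact hl q (by simp [hq]) (by simp [hq1, hq0, hqq, List.cons_prefix_cons, hx])
          have hvnotin : vh ∉ (r0 :: r') := by
            intro hm
            have := hh p (by simp) q (by simp [hq]) vh (by simp [hq1, hqq, hm])
            rw [hv] at this
            simp at this
          have hpres := pvRepl_not_prefix p.1 vh vt t (r0 :: r') (by simp) hvnotin hnq'
          have h2 : (r0 :: r') <+: pvRepl p.1 (vh :: vt) t := by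
            rw [← hv]
            exact hqq ▸ h0.2
          exact hpres h2
    have := ih (fun r hr => hpv r (by simp [hr]))
      (fun r hr q hq => hh r (by simp [hr]) q (by simp [hq]))
      (pvRepl p.1 p.2 t) hl'
    simpa [pvChain] using this

-- the twelve concrete side conditions, checked once by decision procedure
theorem pvPairs_nodup : pvPairsC.Nodup := by decide
theorem pvPairs_comp_bool :
    (pvPairsC.all fun p => pvPairsC.all fun q =>
      decide (p = q) || (pvComp q.1 p.1 && pvComp q.1 p.2)) = true := by decide

theorem pvPairs_comp : ∀ p ∈ pvPairsC, ∀ q ∈ pvPairsC,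
    p = q ∨ (pvComp q.1 p.1 = true ∧ pvComp q.1 p.2 = true) := by
  intro p hp q hq
  have h := pvPairs_comp_bool
  rw [List.all_eq_true] at h
  have h2 := h p hp
  rw [List.all_eq_true] at h2
  have h3 := h2 q hq
  simpa only [Bool.or_eq_true, Bool.and_eq_true, decide_eq_true_eq] using h3
theorem pvPairs_vne : ∀ p ∈ pvPairsC, p.2 ≠ [] := by decide
theorem pvPairs_head_bool :
    (pvPairsC.all fun p => pvPairsC.all fun q =>
      (q.1.drop 1).all fun a => p.2.head? != some a) = true := by decide

theorem pvPairs_head : ∀ p ∈ pvPairsC, ∀ q ∈ pvPairsC, ∀ a ∈ q.1.drop 1,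
    p.2.head? ≠ some a := by
  intro p hp q hq a ha
  have h := pvPairs_head_bool
  rw [List.all_eq_true] at h
  have h2 := h p hp
  rw [List.all_eq_true] at h2
  have h3 := h2 q hq
  rw [List.all_eq_true] at h3
  have h4 := h3 a ha
  simpa only [bne_iff_ne, ne_eq] using h4

def pvMonthsS : List (String × String) :=
  [("Jan.", "January"), ("Feb.", "February"), ("March", "March"), ("April", "April"),
   ("May", "May"), ("June", "June"), ("July", "July"), ("Aug.", "August"),
   ("Sept.", "September"), ("Oct.", "October"), ("Nov.", "November"), ("Dec.", "December")]

theorem pvMonths_toList : pvMonthsS.map (fun p => (p.1.toList, p.2.toList)) = pvPairsC := by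
  decide

theorem pvChain_eq_scan : ∀ n l, l.length ≤ n → pvChain pvPairsC l = pvScanC l := by
  intro n
  induction n with
  | zero =>
    intro l hl
    have : l = [] := List.eq_nil_of_length_eq_zero (Nat.le_zero.mp hl)
    subst this
    rw [pvChain_nil, pvScanC]
  | succ n ih =>
    intro l hl
    match l with
    | [] => rw [pvChain_nil, pvScanC]
    | c :: t =>
      rw [pvScanC]
      cases hf : pvFindK (c :: t) with
      | none =>
        have hnone : ∀ p ∈ pvPairsC, ¬ p.1 <+: (c :: t) := by
          intro p hp
          have := List.find?_eq_none.mp hf p hp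
          rwa [Bool.not_eq_true, pvIsPrefixOf_false] at this
        rw [pvChain_none pvPairsC c pvPairs_vne pvPairs_head t hnone]
        rw [ih t (by simp only [List.length_cons] at hl; omega)]
      | some p =>
        have hp : p ∈ pvPairsC := List.mem_of_find?_eq_some hf
        have hpre : p.1 <+: (c :: t) := by
          have := List.find?_some hf
          rwa [List.isPrefixOf_iff_prefix] at this
        obtain ⟨s, hs⟩ := hpre
        obtain ⟨P1, P2, hsplit⟩ := List.append_of_mem hp
        have hkpos := pvPairsC_key_pos p hp
        have hkne : p.1 ≠ [] := by
          intro h; rw [h] at hkpos; simp at hkpos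
        have hnodup := pvPairs_nodup
        rw [hsplit, List.nodup_append] at hnodup
        have hpnot1 : p ∉ P1 := fun hm => hnodup.2.2 p hm p (by simp) rfl
        have hpnot2 : p ∉ P2 := (List.nodup_cons.mp hnodup.2.1).1
        have h1 : ∀ q ∈ P1, pvComp q.1 p.1 = true := by
          intro q hq
          exact ((pvPairs_comp p hp q (by rw [hsplit]; simp [hq])).resolve_left
            (fun he => hpnot1 (he ▸ hq))).1
        have h2 : ∀ q ∈ P2, pvComp q.1 p.2 = true := by
          intro q hq
          exact ((pvPairs_comp p hp q (by rw [hsplit]; simp [hq])).resolve_left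
            (fun he => hpnot2 (he ▸ hq))).2
        have hchain : pvChain pvPairsC (c :: t) = p.2 ++ pvChain pvPairsC s := by
          rw [← hs, hsplit]
          have := pvChain_some P1 P2 p.1 p.2 s hkne h1 h2
          simpa using this
        have hslen : s.length ≤ n := by
          have := congrArg List.length hs
          simp only [List.length_cons, List.length_append] at this
          simp only [List.length_cons] at hl
          omega
        show _ = p.2 ++ pvScanC (List.drop p.1.length (c :: t))
        rw [hchain, show List.drop p.1.length (c :: t) = s from by rw [← hs]; exact List.drop_left]
        rw [ih s hslen]

theorem pvItems : (PySem.Dict.ofList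
    [("Jan.", "January"), ("Feb.", "February"), ("March", "March"), ("April", "April"),
     ("May", "May"), ("June", "June"), ("July", "July"), ("Aug.", "August"),
     ("Sept.", "September"), ("Oct.", "October"), ("Nov.", "November"), ("Dec.", "December")]
    : PySem.Dict String String).items = pvMonthsS := by decide

-- ===== VERDICT (by name: the statement is the Claim_ definition above) =====
theorem parse_month_py_spec : Claim_equal_parse_month_py := by
  intro text _
  show parse_month_py text = parse_month_py_alt text
  rw [← String.toList_inj]
  show ((PySem.Dict.ofList
    [("Jan.", "January"), ("Feb.", "February"), ("March", "March"), ("April", "April"),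
     ("May", "May"), ("June", "June"), ("July", "July"), ("Aug.", "August"),
     ("Sept.", "September"), ("Oct.", "October"), ("Nov.", "November"), ("Dec.", "December")]
    : PySem.Dict String String).items.foldl (fun t p => PySem.Str.replace t p.1 p.2) text).toList
    = (String.ofList (pvScanC text.toList)).toList
  rw [pvItems, pvChain_toList pvMonthsS (by decide) text]
  rw [pvMonths_toList]
  rw [pvChain_eq_scan text.toList.length text.toList (le_refl _)]
  simp
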